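-- pv_equiv track=rewrite | github.com/ElleryAree/adventofcode | advent22/05_crane.py | parse_stack
-- ===== SOURCE A (Python) =====
-- def parse_stack(lines):
--     buffer = []
--
--     while(True):
--         line = lines.pop(0)
--
--         if '1' in line:
--             buckets = [[] for _ in filter(lambda l: l != '', map(lambda l: l.strip(), line.split(' ')))]
--             lines.pop(0)
--             break
--
--         buffer.append(line)
--
--     for line in buffer:
--         for i in range(1, len(line) - 1, 4):
--             if line[i] == ' ':
--                 continue
--
--             buckets[int(i / 4)].append(line[i])
--
--     return buckets
-- ===== SOURCE B (Python) =====
-- def parse_stack(lines):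
--     # Simpler: locate the numbering row once, slice off the crate rows, then
--     # build the buckets column-major instead of A's pop/append row-major loop.
--     # Mutates `lines` like A does: the crate rows, the numbering row and the
--     # following line are removed.
--     idx = next(i for i, line in enumerate(lines) if '1' in line)
--     buffer = lines[:idx]
--     count = sum(1 for tok in lines[idx].split(' ') if tok.strip() != '')
--     del lines[:idx + 2]
--     return [[row[4 * c + 1] for row in buffer
--              if 4 * c + 1 < len(row) - 1 and row[4 * c + 1] != ' ']
--             for c in range(count)]
-- ===== Notes on version B (the rewrite author's own statement) =====
-- stated objective: simpler
-- what changed: B replaces A's destructive while/pop(0) scan and row-major inner loop over buckets[int(i/4)] with a single enumerate to find the numbering row, one slice for the crate rows, and a column-major comprehension building each bucket directly.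
import Mathlib
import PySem

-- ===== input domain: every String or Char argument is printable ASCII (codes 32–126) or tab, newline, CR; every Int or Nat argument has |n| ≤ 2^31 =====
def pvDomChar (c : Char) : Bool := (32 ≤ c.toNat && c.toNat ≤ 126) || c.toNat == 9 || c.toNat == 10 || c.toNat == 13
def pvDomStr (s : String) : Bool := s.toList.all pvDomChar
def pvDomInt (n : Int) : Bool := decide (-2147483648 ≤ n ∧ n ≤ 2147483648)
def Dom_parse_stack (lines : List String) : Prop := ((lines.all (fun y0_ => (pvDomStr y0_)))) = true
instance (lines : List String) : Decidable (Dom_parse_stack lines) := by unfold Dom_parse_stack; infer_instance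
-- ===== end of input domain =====

-- B locates the numbering row once and builds the buckets column-major from a slice
-- instead of A's pop/append row-major loop (objective: simpler). Return-value equivalence
-- only is proved here; in Python both A and B also consume the same prefix of `lines`
-- in place (crate rows, numbering row, and the line after it).

-- ===== PORT A =====
-- the 'while True: line = lines.pop(0) …' loop: collect lines into `buffer` until one
-- containing '1'; none = IndexError (pop from an empty list — either no '1'-line exists,
-- or nothing is left for the second lines.pop(0))
def pvScanA : List String → List String → Option (List String × String)
  | [], _ => none
  | l :: rest, buf =>
    if PySem.Str.isIn "1" l then
      match rest with
      | [] => none            -- the second lines.pop(0) raises IndexError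
      | _ :: _ => some (buf, l)
    else pvScanA rest (buf ++ [l])

-- '[[] for _ in filter(lambda l: l != '', map(lambda l: l.strip(), line.split(' ')))]'
def pvCountA (line : String) : Nat :=
  List.length ((((PySem.Str.split? line " ").getD []).map (fun t => PySem.Str.strip t)).filter (fun t => t != ""))

-- 'for i in range(1, len(line) - 1, 4): …'; int(i / 4) on the nonnegative i of this
-- range is exactly floor division; 'buckets[int(i / 4)].append(line[i])' where Python
-- would raise IndexError (bucket index out of range) is excluded by Pre_ (List.modify
-- no-ops there)
def pvStepA (bks : List (List String)) (line : String) : List (List String) :=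
  (PySem.List.pyRange 1 (PySem.Str.len line - 1) 4).foldl
    (fun bks i =>
      match PySem.Str.pyGet? line i with
      | none => bks
      | some ch =>
        if ch = ' ' then bks
        else bks.modify (PySem.Int.floordiv i 4).toNat (fun b => b ++ [String.ofList [ch]]))
    bks

def parse_stack (lines : List String) : List (List String) :=
  match pvScanA lines [] with
  | none => []                -- Python raises IndexError here: outside Pre_
  | some (buf, numline) => buf.foldl pvStepA (List.replicate (pvCountA numline) [])

-- ===== PORT B =====
-- 'sum(1 for tok in lines[idx].split(' ') if tok.strip() != '')'
def pvCountB (line : String) : Nat :=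
  ((PySem.Str.split? line " ").getD []).countP (fun t => PySem.Str.strip t != "")

-- '[row[4*c+1] for row in buffer if 4*c+1 < len(row)-1 and row[4*c+1] != ' ']'
-- ('4*c+1 < len(row)-1' over ℤ is '4*c+2 < len(row)'; the index is then in range, so
-- row[4*c+1] is row.toList.getD (4*c+1) ' ')
def pvColB (buffer : List String) (c : Nat) : List String :=
  buffer.filterMap (fun row =>
    if 4 * c + 2 < row.toList.length then
      (if row.toList.getD (4 * c + 1) ' ' ≠ ' ' then some (String.ofList [row.toList.getD (4 * c + 1) ' ']) else none)
    else none)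

def parse_stack_alt (lines : List String) : List (List String) :=
  match lines.findIdx? (fun l => PySem.Str.isIn "1" l) with
  | none => []                -- Source B's 'next(…)' raises StopIteration: outside Pre_
  | some idx =>
    (List.range (pvCountB (lines.getD idx ""))).map (pvColB (lines.take idx))

-- ===== PRECONDITION & SPEC =====
-- Pre_ = exactly the inputs where Python A returns: some line contains '1' and is not the
-- last line (else the second pop(0) raises IndexError), and no crate row before it has a
-- non-space character in a crate column beyond the bucket count (else
-- buckets[int(i / 4)] raises IndexError).
def Pre_parse_stack (lines : List String) : Prop :=
  lines.findIdx (fun l => PySem.Str.isIn "1" l) + 1 < lines.length ∧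
  ∀ row ∈ lines.take (lines.findIdx (fun l => PySem.Str.isIn "1" l)),
    ∀ i ∈ PySem.List.pyRange 1 (PySem.Str.len row - 1) 4,
      ((PySem.Str.pyGet? row i).getD ' ') ≠ ' ' →
        (PySem.Int.floordiv i 4).toNat < pvCountA (lines.getD (lines.findIdx (fun l => PySem.Str.isIn "1" l)) "")
instance (lines : List String) : Decidable (Pre_parse_stack lines) := by
  unfold Pre_parse_stack; infer_instance

def pvWitness_parse_stack : List String := ["[A]", "1 2", ""]

def Spec_parse_stack (lines : List String) (out : List (List String)) : Prop := out = parse_stack_alt lines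
instance (lines : List String) (out : List (List String)) : Decidable (Spec_parse_stack lines out) := by unfold Spec_parse_stack; infer_instance

-- ===== CLAIM (what is proved, stated in full; the proofs are below) =====
def Claim_equal_parse_stack : Prop := ∀ (lines : List String), Dom_parse_stack lines → Pre_parse_stack lines → Spec_parse_stack lines (parse_stack lines)
-- ===== LEMMAS AND PROOFS =====

-- A's bucket count (length of a filtered map) is B's countP of the same tokens
theorem pvCount_eq (s : String) : pvCountA s = pvCountB s := by
  rw [pvCountA, pvCountB, ← List.countP_eq_length_filter, List.countP_map]
  rfl

-- A's scan loop stops at the first '1'-line, having buffered everything before it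
theorem pvScanA_eq (lines : List String) :
    ∀ (buf : List String),
      lines.findIdx (fun l => PySem.Str.isIn "1" l) + 1 < lines.length →
      pvScanA lines buf =
        some (buf ++ lines.take (lines.findIdx (fun l => PySem.Str.isIn "1" l)),
              lines.getD (lines.findIdx (fun l => PySem.Str.isIn "1" l)) "") := by
  induction lines with
  | nil => intro buf h; simp at h
  | cons l rest ih =>
    intro buf h
    by_cases hl : PySem.Chars.isIn ['1'] l.toList
    · rw [List.findIdx_cons] at h ⊢
      rw [pvScanA.eq_def]
      simp [hl]
      match rest, h with
      | r :: rs, _ => simp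
    · rw [List.findIdx_cons] at h ⊢
      simp [hl] at h
      rw [pvScanA.eq_def]
      simp [hl]
      rw [ih (buf ++ [l]) (by simpa [hl] using h)]
      simp

-- fold over range n where step k only touches bucket k (A's inner loop, reindexed)
theorem rangeFold_get (cs : List Char) (m : Nat) (hm : ∀ k, k < m ↔ 4 * k + 2 < cs.length) :
    ∀ (n : Nat), n ≤ m → ∀ (bks : List (List String)) (c : Nat),
      ((List.range n).foldl
        (fun bks k =>
          match cs[4 * k + 1]? with
          | none => bks
          | some ch => if ch = ' ' then bks else bks.modify k (fun b => b ++ [String.ofList [ch]])) bks)[c]?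
      = if c < n then
          bks[c]?.map (fun b => b ++ (if cs[4 * c + 1]?.getD ' ' = ' ' then [] else [String.ofList [cs[4 * c + 1]?.getD ' ']]))
        else bks[c]? := by
  intro n
  induction n with
  | zero => intro _ bks c; simp
  | succ n ih =>
    intro hn bks c
    rw [List.range_succ, List.foldl_append]
    have hlt : 4 * n + 1 < cs.length := by have := (hm n).mp (by omega); omega
    obtain ⟨ch, hch⟩ : ∃ ch, cs[4 * n + 1]? = some ch :=
      ⟨cs[4 * n + 1], List.getElem?_eq_getElem hlt⟩
    have hchd : cs[4 * n + 1]?.getD ' ' = ch := by rw [hch]; rfl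
    simp only [List.foldl_cons, List.foldl_nil, hch]
    by_cases hsp : ch = ' '
    · rw [if_pos hsp, ih (by omega) bks c]
      rcases Nat.lt_trichotomy c n with h | h | h
      · simp [h, show c < n + 1 from by omega]
      · subst h
        simp only [show ¬(c < c) from by omega, if_neg, if_false,
          show c < c + 1 from by omega, if_true, hchd, hsp, if_pos rfl]
        cases bks[c]? <;> simp
      · simp [show ¬(c < n) from by omega, show ¬(c < n + 1) from by omega]
    · rw [if_neg hsp, List.getElem?_modify, ih (by omega) bks c]
      rcases Nat.lt_trichotomy c n with h | h | h
      · simp [h, show c < n + 1 from by omega, show ¬(n = c) from by omega]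
      · subst h
        simp only [show ¬(c < c) from by omega, if_neg, if_false,
          show c < c + 1 from by omega, if_true, hchd, hsp]
        cases bks[c]? <;> simp
      · simp [show ¬(c < n) from by omega, show ¬(c < n + 1) from by omega,
          show ¬(n = c) from by omega]

-- one crate row pushed through A's inner loop, read at bucket c: exactly B's selector
theorem pvStepA_get (bks : List (List String)) (row : String) (c : Nat) :
    (pvStepA bks row)[c]? = bks[c]?.map (· ++ pvColB [row] c) := by
  set cs := row.toList with hcs
  have hlen : PySem.Str.len row = (cs.length : Int) := by simp [hcs]
  rw [pvStepA, hlen, PySem.List.pyRange_of_pos 1 ((cs.length : Int) - 1) (by norm_num),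
    List.foldl_map]
  set M := (if (1 : Int) < (cs.length : Int) - 1 then (((cs.length : Int) - 1 - 1 + 4 - 1) / 4).toNat else 0) with hM
  have hm : ∀ k, k < M ↔ 4 * k + 2 < cs.length := by
    intro k
    rw [hM]
    split_ifs with h
    · constructor <;> intro hk <;> omega
    · constructor <;> intro hk <;> omega
  have hbody : ∀ (b : List (List String)) (k : Nat),
      (match PySem.Str.pyGet? row (1 + 4 * (k : Int)) with
       | none => b
       | some ch =>
         if ch = ' ' then b
         else b.modify (PySem.Int.floordiv (1 + 4 * (k : Int)) 4).toNat (fun l => l ++ [String.ofList [ch]]))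
      = (match cs[4 * k + 1]? with
         | none => b
         | some ch => if ch = ' ' then b else b.modify k (fun l => l ++ [String.ofList [ch]])) := by
    intro b k
    have h1 : (1 + 4 * (k : Int)) = ((4 * k + 1 : Nat) : Int) := by push_cast; ring
    have h2 : PySem.Str.pyGet? row (1 + 4 * (k : Int)) = cs[4 * k + 1]? := by
      rw [h1, PySem.Str.pyGet?_natCast]
    have h3 : (PySem.Int.floordiv (1 + 4 * (k : Int)) 4).toNat = k := by
      rw [PySem.Int.floordiv_eq_ediv_of_pos (by norm_num)]
      omega
    rw [h2, h3]
  have hfold : List.foldl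
      (fun (x : List (List String)) (y : Nat) =>
        match PySem.Str.pyGet? row (1 + 4 * (y : Int)) with
        | none => x
        | some ch =>
          if ch = ' ' then x
          else x.modify (PySem.Int.floordiv (1 + 4 * (y : Int)) 4).toNat fun b => b ++ [String.ofList [ch]])
      bks (List.range M)
      = List.foldl
      (fun (b : List (List String)) (k : Nat) =>
        match cs[4 * k + 1]? with
        | none => b
        | some ch => if ch = ' ' then b else b.modify k (fun l => l ++ [String.ofList [ch]]))
      bks (List.range M) :=
    PySem.List.foldl_congr_mem _ _ _ _ (fun b k _ => hbody b k)
  rw [hfold, rangeFold_get cs M hm M le_rfl bks c]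
  have hcol : pvColB [row] c =
      if c < M then (if cs[4 * c + 1]?.getD ' ' = ' ' then [] else [String.ofList [cs[4 * c + 1]?.getD ' ']]) else [] := by
    rw [pvColB]
    by_cases hc : c < M
    · have hr : 4 * c + 2 < cs.length := (hm c).mp hc
      have hgd : cs.getD (4 * c + 1) ' ' = cs[4 * c + 1]?.getD ' ' := List.getD_eq_getElem?_getD
      simp only [List.filterMap_cons, List.filterMap_nil, ← hcs, if_pos hr, if_pos hc, hgd]
      by_cases hsp : cs[4 * c + 1]?.getD ' ' = ' ' <;> simp [hsp]
    · have hr : ¬ (4 * c + 2 < cs.length) := fun h => hc ((hm c).mpr h)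
      have hr' : ¬ (4 * c + 2 < row.length) := by simpa [hcs] using hr
      simp [← hcs, hr', hc]
  rw [hcol]
  by_cases hc : c < M
  · rw [if_pos hc, if_pos hc]
  · rw [if_neg hc, if_neg hc]
    cases bks[c]? <;> simp

-- A's whole row-major loop over the buffer, read at bucket c: B's whole column c
theorem pvFoldA_get (buffer : List String) :
    ∀ (bks : List (List String)) (c : Nat),
      (buffer.foldl pvStepA bks)[c]? = bks[c]?.map (· ++ pvColB buffer c) := by
  induction buffer with
  | nil =>
    intro bks c
    rw [List.foldl_nil, pvColB]
    cases bks[c]? <;> simp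
  | cons row rest ih =>
    intro bks c
    have hsplit : pvColB (row :: rest) c = pvColB [row] c ++ pvColB rest c := by
      simp only [pvColB, List.filterMap_cons, List.filterMap_nil]
      split <;> simp
    rw [List.foldl_cons, ih (pvStepA bks row) c, pvStepA_get, hsplit]
    cases bks[c]? <;> simp

-- ===== VERDICT (by name: the statement is the Claim_ definition above) =====
theorem parse_stack_spec : Claim_equal_parse_stack := by
  intro lines _ hpre
  unfold Spec_parse_stack
  obtain ⟨h1, _⟩ := hpre
  have hidx : lines.findIdx? (fun l => PySem.Str.isIn "1" l)
      = some (lines.findIdx (fun l => PySem.Str.isIn "1" l)) := by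
    rw [List.findIdx?_eq_some_iff_findIdx_eq]
    exact ⟨by omega, rfl⟩
  rw [parse_stack, parse_stack_alt, pvScanA_eq lines [] h1, hidx]
  apply List.ext_getElem?
  intro c
  rw [pvFoldA_get]
  simp [List.getElem?_replicate, pvCount_eq]
  split_ifs with h
  · simp [h]
  · simp [h]
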